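-- pv_equiv track=rewrite | github.com/fabianruiz3/pokerbots-2026 | Camello_cfr copy/abstraction.py | get_board_bucket
-- ===== SOURCE A (Python) =====
-- def get_board_bucket(board_cards):
--     """
--     Compute board bucket - matches C++ board_bucket.
--
--     Args:
--         board_cards: list of card ints or strings
--
--     Returns:
--         bucket index 0-79
--     """
--     if not board_cards:
--         return 0
--
--     cards = []
--     for c in board_cards:
--         if isinstance(c, int):
--             cards.append(c)
--         else:
--             cards.append(card_str_to_int(str(c)))
--
--     ranks = [c // 4 for c in cards]
--     suits = [c % 4 for c in cards]
--
--     # Rank counts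
--     rc = [0] * 13
--     for r in ranks:
--         rc[r] += 1
--     max_rank_count = max(rc)
--
--     # Suit counts
--     sc = [0] * 4
--     for s in suits:
--         sc[s] += 1
--     max_suit_count = max(sc)
--
--     # Straight potential
--     uniq = sorted(set(ranks))
--     straight_potential = 0
--     for i in range(len(uniq)):
--         for j in range(i + 1, len(uniq)):
--             if uniq[j] - uniq[i] <= 4:
--                 straight_potential = max(straight_potential, j - i + 1)
--
--     high_card = max(ranks)
--
--     # Broadway count (rank >= 8, which is T in 0-12 scale)
--     broadway = sum(1 for r in ranks if r >= 8)
--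
--     # Feature vector: [max_rank_count, max_suit_count, straight_potential, high_card, broadway]
--     bucket = 0
--     bucket += (max_rank_count - 1) * 20
--     bucket += (max_suit_count - 1) * 8
--     bucket += max(0, straight_potential - 2) * 4
--     bucket += broadway * 2
--     bucket += high_card // 2
--
--     return max(0, min(79, bucket))
--
-- def card_str_to_int(card_str):
--     """
--     Convert card string like 'Ah' to int format (rank*4 + suit).
--
--     Rank: 2=0, 3=1, ..., T=8, J=9, Q=10, K=11, A=12
--     Suit: c=0, d=1, h=2, s=3 (or any consistent mapping)
--     """
--     rank_map = {'2': 0, '3': 1, '4': 2, '5': 3, '6': 4, '7': 5, '8': 6, '9': 7,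
--                 'T': 8, 'J': 9, 'Q': 10, 'K': 11, 'A': 12}
--     suit_map = {'c': 0, 'd': 1, 'h': 2, 's': 3}
--
--     r = rank_map.get(card_str[0].upper(), 0)
--     s = suit_map.get(card_str[1].lower(), 0)
--     return r * 4 + s
-- ===== SOURCE B (Python) =====
-- def card_str_to_int(card_str):
--     rank_map = {'2': 0, '3': 1, '4': 2, '5': 3, '6': 4, '7': 5, '8': 6, '9': 7,
--                 'T': 8, 'J': 9, 'Q': 10, 'K': 11, 'A': 12}
--     suit_map = {'c': 0, 'd': 1, 'h': 2, 's': 3}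
--     r = rank_map.get(card_str[0].upper(), 0)
--     s = suit_map.get(card_str[1].lower(), 0)
--     return r * 4 + s
--
--
-- def get_board_bucket(board_cards):
--     """No mutable histograms, no sort, no nested pair scan: maxima of counts are
--     taken directly over the distinct values, and straight potential is the best
--     5-wide window count over the set of ranks."""
--     if not board_cards:
--         return 0
--     cards = [c if isinstance(c, int) else card_str_to_int(str(c)) for c in board_cards]
--     ranks = [c // 4 for c in cards]
--     suits = [c % 4 for c in cards]
--     present = set(ranks)
--     span = max(sum(1 for u in present if lo <= u <= lo + 4) for lo in present)
--     score = ((max(ranks.count(r) for r in present) - 1) * 20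
--              + (max(suits.count(s) for s in set(suits)) - 1) * 8
--              + max(0, span - 2) * 4
--              + sum(1 for r in ranks if r >= 8) * 2
--              + max(ranks) // 2)
--     return max(0, min(79, score))
-- ===== Notes on version B (the rewrite author's own statement) =====
-- stated objective: alternative
-- what changed: A builds mutable 13/4-slot histograms by in-place increments, sorts the unique ranks and runs a nested max-over-all-pairs scan for straight potential; B keeps no histograms at all (the count maxima are taken directly as max(list.count(v)) over the distinct values), never sorts, and gets straight potential as the best 5-wide window count over the set of ranks.
-- outside the precondition, e.g. on get_board_bucket([-8, 44]): A returns 35, B returns 15; on get_board_bucket([60]): A raises IndexError, B returns 9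
import Mathlib
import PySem

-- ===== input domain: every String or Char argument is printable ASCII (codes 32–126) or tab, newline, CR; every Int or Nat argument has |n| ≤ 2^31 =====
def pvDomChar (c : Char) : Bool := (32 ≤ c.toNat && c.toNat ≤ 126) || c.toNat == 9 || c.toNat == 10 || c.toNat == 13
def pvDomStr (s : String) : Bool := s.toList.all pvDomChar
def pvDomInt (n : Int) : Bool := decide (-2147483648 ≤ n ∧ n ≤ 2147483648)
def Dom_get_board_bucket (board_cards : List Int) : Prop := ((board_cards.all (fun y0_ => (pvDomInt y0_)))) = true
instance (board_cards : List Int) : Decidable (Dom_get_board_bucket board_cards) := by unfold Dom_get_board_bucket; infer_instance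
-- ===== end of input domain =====

-- B drops A's mutable histograms, the sort and the nested pair scan: count maxima are taken
-- directly over the distinct values and straight potential is a 5-wide window count on the
-- rank set; same return value on all of Pre_ (objective: alternative).
-- Under the List Int signature the isinstance-str branch of both Pythons is unreachable.

-- ===== PORT A =====
-- Python `xs[i] += 1` (read then write, Python index semantics; in range under Pre_)
def pvIncr (xs : List Int) (i : Int) : List Int :=
  PySem.List.pySetD xs i (PySem.List.pyGetD xs i 0 + 1)

def get_board_bucket (board_cards : List Int) : Int :=
  if board_cards = [] then 0
  else
    let cards := board_cards
    let ranks := cards.map (fun c => PySem.Int.floordiv c 4)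
    let suits := cards.map (fun c => PySem.Int.mod c 4)
    let rc := ranks.foldl (fun a r => pvIncr a r) (List.replicate 13 (0 : Int))
    let max_rank_count := (PySem.List.max? rc (fun x => x)).getD 0
    let sc := suits.foldl (fun a s => pvIncr a s) (List.replicate 4 (0 : Int))
    let max_suit_count := (PySem.List.max? sc (fun x => x)).getD 0
    let uniq := PySem.List.sorted (PySem.Set.ofList ranks) (fun x => x)
    let n : Int := uniq.length
    let sp := (PySem.List.pyRange 0 n).foldl (fun sp i =>
        (PySem.List.pyRange (i + 1) n).foldl (fun sp j =>
          if PySem.List.pyGetD uniq j 0 - PySem.List.pyGetD uniq i 0 ≤ 4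
          then max sp (j - i + 1) else sp) sp) 0
    let high_card := (PySem.List.max? ranks (fun x => x)).getD 0
    let broadway := ranks.foldl (fun a r => if r ≥ 8 then a + 1 else a) 0
    let bucket := (max_rank_count - 1) * 20 + (max_suit_count - 1) * 8
      + max 0 (sp - 2) * 4 + broadway * 2 + PySem.Int.floordiv high_card 2
    max 0 (min 79 bucket)

-- ===== PORT B =====
def get_board_bucket_alt (board_cards : List Int) : Int :=
  if board_cards = [] then 0
  else
    let cards := board_cards
    let ranks := cards.map (fun c => PySem.Int.floordiv c 4)
    let suits := cards.map (fun c => PySem.Int.mod c 4)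
    let present := PySem.Set.ofList ranks
    let span := (PySem.List.max?
      (present.map (fun lo => (present.countP (fun u => decide (lo ≤ u ∧ u ≤ lo + 4)) : Int)))
      (fun x => x)).getD 0
    let score := ((PySem.List.max? (present.map (fun r => (ranks.count r : Int))) (fun x => x)).getD 0 - 1) * 20
      + ((PySem.List.max? ((PySem.Set.ofList suits).map (fun s => (suits.count s : Int))) (fun x => x)).getD 0 - 1) * 8
      + max 0 (span - 2) * 4
      + (ranks.countP (fun r => decide (r ≥ 8)) : Int) * 2
      + PySem.Int.floordiv ((PySem.List.max? ranks (fun x => x)).getD 0) 2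
    max 0 (min 79 score)

-- ===== PRECONDITION & SPEC =====
-- Pre_ restricts to the natural domain of card encodings 0..51 (rank*4 + suit of a 52-card
-- deck, the function's stated input). Outside it A raises IndexError when |card| is large,
-- and for negative card ints it fills the 13-slot rank table through Python's negative
-- indexing (rank r lands in slot r+13); negative ints are not card encodings, and B, which
-- counts the actual rank values, does the natural thing there.
def Pre_get_board_bucket (board_cards : List Int) : Prop :=
  ∀ c ∈ board_cards, 0 ≤ c ∧ c ≤ 51
instance (board_cards : List Int) : Decidable (Pre_get_board_bucket board_cards) := by
  unfold Pre_get_board_bucket; infer_instance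

def pvWitness_get_board_bucket : List Int := [0, 17, 51, 3]

def Spec_get_board_bucket (board_cards : List Int) (out : Int) : Prop := out = get_board_bucket_alt board_cards
instance (board_cards : List Int) (out : Int) : Decidable (Spec_get_board_bucket board_cards out) := by unfold Spec_get_board_bucket; infer_instance

-- ===== CLAIM (what is proved, stated in full; the proofs are below) =====
def Claim_equal_get_board_bucket : Prop := ∀ (board_cards : List Int), Dom_get_board_bucket board_cards → Pre_get_board_bucket board_cards → Spec_get_board_bucket board_cards (get_board_bucket board_cards)

-- ===== LEMMAS AND PROOFS =====

-- `(max? xs id).getD 0` of a nonempty list is a member and an upper bound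
lemma maxD_spec (xs : List Int) (hne : xs ≠ []) :
    ((PySem.List.max? xs (fun x => x)).getD 0) ∈ xs ∧
    ∀ y ∈ xs, y ≤ (PySem.List.max? xs (fun x => x)).getD 0 := by
  cases hm : PySem.List.max? xs (fun x => x) with
  | none => exact absurd ((PySem.List.max?_eq_none_iff xs (fun x => x)).1 hm) hne
  | some m =>
    refine ⟨PySem.List.max?_mem hm, fun y hy => ?_⟩
    simpa using PySem.List.max?_isMax hm y hy

-- two nonempty lists dominating each other have the same max
lemma maxD_eq (xs ys : List Int) (hx : xs ≠ []) (hy : ys ≠ [])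
    (h1 : ∀ a ∈ xs, ∃ b ∈ ys, a ≤ b) (h2 : ∀ b ∈ ys, ∃ a ∈ xs, b ≤ a) :
    (PySem.List.max? xs (fun x => x)).getD 0 = (PySem.List.max? ys (fun x => x)).getD 0 := by
  obtain ⟨hmx, hux⟩ := maxD_spec xs hx
  obtain ⟨hmy, huy⟩ := maxD_spec ys hy
  obtain ⟨b, hb, hab⟩ := h1 _ hmx
  obtain ⟨a, ha, hba⟩ := h2 _ hmy
  have := hux a ha
  have := huy b hb
  omega

-- the histogram loop: slot k of the result holds slot k of the start plus the count of k
lemma rc_getD (l : List Int) : ∀ (acc : List Int), (∀ r ∈ l, 0 ≤ r ∧ r < (acc.length : Int)) →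
    (l.foldl (fun a r => pvIncr a r) acc).length = acc.length ∧
    ∀ k : Nat, k < acc.length →
      (l.foldl (fun a r => pvIncr a r) acc).getD k 0 = acc.getD k 0 + (l.count ((k : Nat) : Int) : Int) := by
  induction l with
  | nil => intro acc _; simp
  | cons r t ih =>
    intro acc hb
    obtain ⟨hr0, hrl⟩ := hb r (List.mem_cons_self)
    have hset : pvIncr acc r = acc.set r.toNat (PySem.List.pyGetD acc r 0 + 1) := by
      unfold pvIncr; exact PySem.List.pySetD_of_nonneg acc _ hr0
    have hlen : (pvIncr acc r).length = acc.length := by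
      rw [hset, List.length_set]
    have hget : ∀ k : Nat, k < acc.length →
        (pvIncr acc r).getD k 0 = acc.getD k 0 + if ((k : Nat) : Int) = r then 1 else 0 := by
      intro k hk
      rw [hset]
      rw [List.getD_eq_getElem?_getD, List.getElem?_set, List.getD_eq_getElem?_getD]
      by_cases hkr : r.toNat = k
      · have hkr' : ((k : Nat) : Int) = r := by omega
        have hpg : PySem.List.pyGetD acc r 0 = acc[k]'hk := by
          rw [PySem.List.pyGetD_eq_getElem acc 0 hr0 (by exact_mod_cast hrl)]
          simp only [hkr]
        simp [hkr, hkr', hpg, hk]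
      · have hkr' : ¬ ((k : Nat) : Int) = r := by omega
        simp [hkr, hkr']
    obtain ⟨ihlen, ihget⟩ := ih (pvIncr acc r) (by
      intro x hx
      obtain ⟨h0, h1⟩ := hb x (List.mem_cons_of_mem _ hx)
      exact ⟨h0, by rw [hlen]; exact h1⟩)
    refine ⟨by rw [List.foldl_cons] at *; rw [ihlen, hlen], fun k hk => ?_⟩
    have hk' : k < (pvIncr acc r).length := by omega
    simp only [List.foldl_cons]
    rw [ihget k hk', hget k hk]
    by_cases h : ((k : Nat) : Int) = r
    · rw [if_pos h, ← h, List.count_cons_self]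
      push_cast
      ring
    · rw [if_neg h, List.count_cons_of_ne (fun hh => h hh.symm)]
      omega

-- max of the 13-slot histogram = max over the distinct values of their counts
lemma max_hist_eq (l : List Int) (N : Nat) (hne : l ≠ [])
    (hb : ∀ r ∈ l, 0 ≤ r ∧ r < (N : Int)) (hN : 0 < N) :
    (PySem.List.max? (l.foldl (fun a r => pvIncr a r) (List.replicate N (0 : Int))) (fun x => x)).getD 0
      = (PySem.List.max? ((PySem.Set.ofList l).map (fun r => (l.count r : Int))) (fun x => x)).getD 0 := by
  set rc := l.foldl (fun a r => pvIncr a r) (List.replicate N (0 : Int)) with hrc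
  obtain ⟨hlen, hget⟩ := rc_getD l (List.replicate N (0 : Int))
    (by simpa using hb)
  rw [← hrc] at hlen hget
  rw [List.length_replicate] at hlen
  have hgetc : ∀ k : Nat, k < N → rc.getD k 0 = (l.count ((k : Nat) : Int) : Int) := by
    intro k hk
    have h := hget k (by simpa using hk)
    rw [h]
    simp [List.getD_eq_getElem?_getD, hk]
  have hrcne : rc ≠ [] := by
    intro h; rw [h] at hlen; simp at hlen; omega
  have hsne : PySem.Set.ofList l ≠ [] := by
    obtain ⟨x, hx⟩ := List.exists_mem_of_ne_nil l hne
    intro h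
    have := (PySem.Set.mem_ofList l x).2 hx
    rw [h] at this; simp at this
  have hmapne : (PySem.Set.ofList l).map (fun r => (l.count r : Int)) ≠ [] := by
    simpa using hsne
  apply maxD_eq _ _ hrcne hmapne
  · intro a ha
    obtain ⟨k, hk, hak⟩ := List.mem_iff_getElem.1 ha
    have hkN : k < N := by omega
    have hav : a = (l.count ((k : Nat) : Int) : Int) := by
      rw [← hgetc k hkN, List.getD_eq_getElem?_getD, List.getElem?_eq_getElem hk, hak]
      rfl
    by_cases hc : ((k : Nat) : Int) ∈ l
    · refine ⟨(l.count ((k : Nat) : Int) : Int), ?_, by omega⟩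
      exact List.mem_map.2 ⟨_, (PySem.Set.mem_ofList _ _).2 hc, rfl⟩
    · obtain ⟨x, hx⟩ := List.exists_mem_of_ne_nil l hne
      refine ⟨(l.count x : Int), List.mem_map.2 ⟨x, (PySem.Set.mem_ofList _ _).2 hx, rfl⟩, ?_⟩
      have h0 : l.count ((k : Nat) : Int) = 0 := List.count_eq_zero.2 hc
      have h1 : 0 < l.count x := List.count_pos_iff.2 hx
      omega
  · intro b hb'
    obtain ⟨r, hr, hrb⟩ := List.mem_map.1 hb'
    have hrl : r ∈ l := (PySem.Set.mem_ofList _ _).1 hr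
    obtain ⟨hr0, hrN⟩ := hb r hrl
    refine ⟨rc.getD r.toNat 0, ?_, ?_⟩
    · have : r.toNat < rc.length := by omega
      rw [List.getD_eq_getElem?_getD, List.getElem?_eq_getElem this]
      exact List.getElem_mem this
    · rw [hgetc r.toNat (by omega)]
      have : ((r.toNat : Nat) : Int) = r := by omega
      rw [this, ← hrb]

lemma foldl_le_iff {α : Type} (f : Int → α → Int) (P : α → Prop) (b : Int)
    (hf : ∀ s x, f s x ≤ b ↔ s ≤ b ∧ P x) :
    ∀ (l : List α) (a : Int), l.foldl f a ≤ b ↔ a ≤ b ∧ ∀ x ∈ l, P x := by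
  intro l
  induction l with
  | nil => simp
  | cons y t ih =>
    intro a
    simp only [List.foldl_cons, ih, hf, List.mem_cons]
    constructor
    · rintro ⟨⟨h1, h2⟩, h3⟩
      exact ⟨h1, by rintro x (rfl | hx); exact h2; exact h3 x hx⟩
    · rintro ⟨h1, h3⟩
      exact ⟨⟨h1, h3 y (Or.inl rfl)⟩, fun x hx => h3 x (Or.inr hx)⟩

lemma le_foldl_of_mono {α : Type} (f : Int → α → Int) (hf : ∀ s x, s ≤ f s x) :
    ∀ (l : List α) (a : Int), a ≤ l.foldl f a := by
  intro l
  induction l with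
  | nil => simp
  | cons y t ih => intro a; exact le_trans (hf a y) (ih (f a y))

lemma le_foldl_of_mem {α : Type} (f : Int → α → Int) (hf : ∀ s x, s ≤ f s x)
    (v : Int) (x : α) (hx : ∀ s, v ≤ f s x) :
    ∀ (l : List α) (a : Int), x ∈ l → v ≤ l.foldl f a := by
  intro l
  induction l with
  | nil => simp
  | cons y t ih =>
    intro a hm
    rcases List.mem_cons.1 hm with rfl | hm
    · exact le_trans (hx a) (le_foldl_of_mono f hf t (f a x))
    · exact ih (f a y) hm

lemma getElem_le_of_lt_countP (u : List Int) (hle : u.Pairwise (· ≤ ·)) (T : Int)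
    (k : Nat) (hk : k < u.length)
    (hcnt : k < u.countP (fun x => decide (x ≤ T))) : u[k] ≤ T := by
  by_contra h'
  rw [not_le] at h'
  have hsplit : u.countP (fun x => decide (x ≤ T)) =
      (u.take k).countP (fun x => decide (x ≤ T)) + (u.drop k).countP (fun x => decide (x ≤ T)) := by
    rw [← List.countP_append, List.take_append_drop]
  have hmono := List.pairwise_iff_getElem.1 hle
  have h2 : (u.drop k).countP (fun x => decide (x ≤ T)) = 0 := by
    apply List.countP_eq_zero.2
    intro x hx
    rcases List.mem_iff_getElem.1 hx with ⟨j, hj, rfl⟩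
    have hj' : k + j < u.length := by
      have := List.length_drop (l := u) (i := k); omega
    rw [List.getElem_drop]
    have hku : u[k] ≤ u[k + j] := by
      rcases Nat.eq_zero_or_pos j with rfl | hp
      · simp
      · exact hmono k (k + j) hk hj' (by omega)
    simp only [decide_eq_true_eq]
    omega
  have h3 : (u.take k).countP (fun x => decide (x ≤ T)) ≤ k :=
    le_trans List.countP_le_length (by rw [List.length_take]; omega)
  omega

lemma lt_countP_of_getElem_le (u : List Int) (hle : u.Pairwise (· ≤ ·)) (T : Int)
    (k : Nat) (hk : k < u.length) (hT : u[k] ≤ T) :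
    k < u.countP (fun x => decide (x ≤ T)) := by
  have hmono := List.pairwise_iff_getElem.1 hle
  have hsplit : u.countP (fun x => decide (x ≤ T)) =
      (u.take (k+1)).countP (fun x => decide (x ≤ T)) + (u.drop (k+1)).countP (fun x => decide (x ≤ T)) := by
    rw [← List.countP_append, List.take_append_drop]
  have h1 : (u.take (k+1)).countP (fun x => decide (x ≤ T)) = (u.take (k+1)).length := by
    apply List.countP_eq_length.2
    intro x hx
    rcases List.mem_iff_getElem.1 hx with ⟨j, hj, rfl⟩
    have hjl : j < u.length := by
      have := List.length_take (i := k+1) (l := u); omega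
    rw [List.getElem_take]
    have hjk : j ≤ k := by
      have := List.length_take (i := k+1) (l := u); omega
    have : u[j] ≤ u[k] := by
      rcases Nat.lt_or_ge j k with hlt | hge
      · exact hmono j k hjl hk hlt
      · have : j = k := by omega
        subst this; exact le_refl _
    simp only [decide_eq_true_eq]
    omega
  have h2 : (u.take (k+1)).length = k + 1 := by rw [List.length_take]; omega
  omega

-- in a strictly increasing list, the elements below u[k] are exactly the first k
lemma countP_lt_eq_idx (u : List Int) (hlt : u.Pairwise (· < ·))
    (k : Nat) (hk : k < u.length) :
    u.countP (fun x => decide (x < u[k])) = k := by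
  have hmono := List.pairwise_iff_getElem.1 hlt
  have hsplit : u.countP (fun x => decide (x < u[k])) =
      (u.take k).countP (fun x => decide (x < u[k])) + (u.drop k).countP (fun x => decide (x < u[k])) := by
    rw [← List.countP_append, List.take_append_drop]
  have h1 : (u.take k).countP (fun x => decide (x < u[k])) = (u.take k).length := by
    apply List.countP_eq_length.2
    intro x hx
    rcases List.mem_iff_getElem.1 hx with ⟨j, hj, rfl⟩
    have hjl : j < u.length := by
      have := List.length_take (i := k) (l := u); omega
    rw [List.getElem_take]
    have hjk : j < k := by
      have := List.length_take (i := k) (l := u); omega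
    simp only [decide_eq_true_eq]
    exact hmono j k hjl hk hjk
  have h2 : (u.drop k).countP (fun x => decide (x < u[k])) = 0 := by
    apply List.countP_eq_zero.2
    intro x hx
    rcases List.mem_iff_getElem.1 hx with ⟨j, hj, rfl⟩
    have hj' : k + j < u.length := by
      have := List.length_drop (l := u) (i := k); omega
    rw [List.getElem_drop]
    have : u[k] ≤ u[k + j] := by
      rcases Nat.eq_zero_or_pos j with rfl | hp
      · simp
      · exact le_of_lt (hmono k (k + j) hk hj' (by omega))
    simp only [decide_eq_true_eq]
    omega
  have h3 : (u.take k).length = k := by rw [List.length_take]; omega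
  omega

-- pointwise split of a prefix count
lemma countP_split (L : List Int) (a T : Int) (h : a ≤ T) :
    L.countP (fun x => decide (x ≤ T)) =
      L.countP (fun x => decide (x < a)) + L.countP (fun x => decide (a ≤ x ∧ x ≤ T)) := by
  induction L with
  | nil => simp
  | cons y t ih =>
    rw [List.countP_cons, List.countP_cons, List.countP_cons, ih]
    by_cases h3 : a ≤ y ∧ y ≤ T
    · have h1 : ¬ y < a := by omega
      have h2 : y ≤ T := h3.2
      simp only [decide_eq_true_eq, if_pos h3, if_pos h2, if_neg h1]
      omega
    · by_cases h2 : y ≤ T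
      · have h1 : y < a := by omega
        simp only [decide_eq_true_eq, if_neg h3, if_pos h2, if_pos h1]
        omega
      · have h1 : ¬ y < a := by omega
        simp only [decide_eq_true_eq, if_neg h3, if_neg h2, if_neg h1]
        omega

-- the 5-wide window count at u[k] in a strictly increasing list
lemma win_eq_cnt_sub (u : List Int) (hlt : u.Pairwise (· < ·))
    (k : Nat) (hk : k < u.length) :
    (u.countP (fun x => decide (u[k] ≤ x ∧ x ≤ u[k] + 4)) : Int)
      = (u.countP (fun x => decide (x ≤ u[k] + 4)) : Int) - k := by
  have hsum := countP_split u u[k] (u[k] + 4) (by omega)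
  rw [countP_lt_eq_idx u hlt k hk] at hsum
  omega

def pvSpOf (u : List Int) : Int :=
  (PySem.List.pyRange 0 (u.length : Int)).foldl (fun sp i =>
    (PySem.List.pyRange (i + 1) (u.length : Int)).foldl (fun sp j =>
      if PySem.List.pyGetD u j 0 - PySem.List.pyGetD u i 0 ≤ 4
      then max sp (j - i + 1) else sp) sp) 0

-- B's window maximum, over an arbitrary base list s
def pvWinOf (s : List Int) : Int :=
  (PySem.List.max? (s.map (fun lo => (s.countP (fun u => decide (lo ≤ u ∧ u ≤ lo + 4)) : Int)))
    (fun x => x)).getD 0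

lemma spOf_le_iff (u : List Int) (b : Int) :
    pvSpOf u ≤ b ↔ 0 ≤ b ∧ ∀ i j : Int, 0 ≤ i → i < j → j < (u.length : Int) →
      PySem.List.pyGetD u j 0 - PySem.List.pyGetD u i 0 ≤ 4 → j - i + 1 ≤ b := by
  unfold pvSpOf
  rw [foldl_le_iff _ (fun i => ∀ j : Int, i < j → j < (u.length : Int) →
      PySem.List.pyGetD u j 0 - PySem.List.pyGetD u i 0 ≤ 4 → j - i + 1 ≤ b) b ?_]
  · constructor
    · rintro ⟨h0, h⟩
      refine ⟨h0, fun i j h0i hij hjn hc => ?_⟩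
      exact h i (PySem.List.mem_pyRange_one.2 ⟨h0i, lt_trans hij hjn⟩) j hij hjn hc
    · rintro ⟨h0, h⟩
      refine ⟨h0, fun i hi j hij hjn hc => ?_⟩
      exact h i j (PySem.List.mem_pyRange_one.1 hi).1 hij hjn hc
  · intro s i
    rw [foldl_le_iff _ (fun j => PySem.List.pyGetD u j 0 - PySem.List.pyGetD u i 0 ≤ 4 →
        j - i + 1 ≤ b) b ?_]
    · constructor
      · rintro ⟨hs, h⟩
        refine ⟨hs, fun j hij hjn hc => ?_⟩
        exact h j (PySem.List.mem_pyRange_one.2 ⟨by omega, hjn⟩) hc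
      · rintro ⟨hs, h⟩
        refine ⟨hs, fun j hj hc => ?_⟩
        have := PySem.List.mem_pyRange_one.1 hj
        exact h j (by omega) this.2 hc
    · intro s j
      split_ifs with hc
      · simp [hc]
      · simp [hc]

lemma spOf_nonneg (u : List Int) : 0 ≤ pvSpOf u := by
  unfold pvSpOf
  apply le_foldl_of_mono
  intro s i
  apply le_foldl_of_mono
  intro s j
  split_ifs
  · exact le_max_left _ _
  · exact le_refl _

lemma le_spOf (u : List Int) (i j : Int) (h0i : 0 ≤ i) (hij : i < j) (hjn : j < (u.length : Int))
    (hc : PySem.List.pyGetD u j 0 - PySem.List.pyGetD u i 0 ≤ 4) :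
    j - i + 1 ≤ pvSpOf u := by
  unfold pvSpOf
  apply le_foldl_of_mem _ ?mono _ i ?hx _ _ (PySem.List.mem_pyRange_one.2 ⟨h0i, by omega⟩)
  case mono =>
    intro s i'
    apply le_foldl_of_mono
    intro s j'
    split_ifs
    · exact le_max_left _ _
    · exact le_refl _
  case hx =>
    intro s
    apply le_foldl_of_mem _ ?m2 _ j ?h2 _ _ (PySem.List.mem_pyRange_one.2 ⟨by omega, hjn⟩)
    case m2 =>
      intro s j'
      split_ifs
      · exact le_max_left _ _
      · exact le_refl _
    case h2 =>
      intro s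
      rw [if_pos hc]
      exact le_max_right _ _

-- window values are members of pvWinOf's list and bounded by it
lemma winOf_spec (u : List Int) (hne : u ≠ []) (k : Nat) (hk : k < u.length) :
    (u.countP (fun x => decide (u[k] ≤ x ∧ x ≤ u[k] + 4)) : Int) ≤ pvWinOf u := by
  have hmne : u.map (fun lo => (u.countP (fun x => decide (lo ≤ x ∧ x ≤ lo + 4)) : Int)) ≠ [] := by
    simpa using hne
  obtain ⟨_, hub⟩ := maxD_spec _ hmne
  exact hub _ (List.mem_map.2 ⟨u[k], List.getElem_mem hk, rfl⟩)

lemma winOf_le (u : List Int) (hne : u ≠ []) (b : Int)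
    (h : ∀ k : Nat, (hk : k < u.length) →
      (u.countP (fun x => decide (u[k] ≤ x ∧ x ≤ u[k] + 4)) : Int) ≤ b) :
    pvWinOf u ≤ b := by
  unfold pvWinOf
  have hmne : u.map (fun lo => (u.countP (fun x => decide (lo ≤ x ∧ x ≤ lo + 4)) : Int)) ≠ [] := by
    simpa using hne
  obtain ⟨hmem, _⟩ := maxD_spec _ hmne
  obtain ⟨lo, hlo, hval⟩ := List.mem_map.1 hmem
  obtain ⟨k, hk, rfl⟩ := List.mem_iff_getElem.1 hlo
  rw [← hval]
  exact h k hk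

-- core: on a nonempty strictly increasing list, the clamped pair-scan value equals the
-- clamped best window value
lemma sp_win (u : List Int) (h : u.Pairwise (· < ·)) (hne : u ≠ []) :
    max 0 (pvSpOf u - 2) = max 0 (pvWinOf u - 2) := by
  have hle : u.Pairwise (· ≤ ·) := h.imp le_of_lt
  have hAB : pvSpOf u ≤ pvWinOf u := by
    rw [spOf_le_iff]
    constructor
    · obtain ⟨x, hx⟩ := List.exists_mem_of_ne_nil u hne
      obtain ⟨k, hk, rfl⟩ := List.mem_iff_getElem.1 hx
      have := winOf_spec u hne k hk
      have : (0 : Int) ≤ (u.countP (fun x => decide (u[k] ≤ x ∧ x ≤ u[k] + 4)) : Int) := by positivity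
      omega
    · intro i j h0i hij hjn hc
      have hki : i.toNat < u.length := by omega
      have hkj : j.toNat < u.length := by omega
      rw [PySem.List.pyGetD_eq_getElem u 0 (by omega) hjn,
          PySem.List.pyGetD_eq_getElem u 0 (by omega) (by omega)] at hc
      have hcnt : j.toNat < u.countP (fun x => decide (x ≤ u[i.toNat] + 4)) :=
        lt_countP_of_getElem_le u hle _ j.toNat hkj (by omega)
      have hwin := win_eq_cnt_sub u h i.toNat hki
      have := winOf_spec u hne i.toNat hki
      omega
  have hBA : pvWinOf u ≤ max (pvSpOf u) 1 := by
    apply winOf_le u hne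
    intro k hk
    rw [win_eq_cnt_sub u h k hk]
    set cnt := u.countP (fun x => decide (x ≤ u[k] + 4)) with hcntdef
    rcases Nat.lt_or_ge (k + 1) cnt with hbig | hsmall
    · have hcl : cnt ≤ u.length := List.countP_le_length
      have hl : cnt - 1 < u.length := by omega
      have hval : u[cnt - 1] ≤ u[k] + 4 :=
        getElem_le_of_lt_countP u hle _ (cnt - 1) hl (by omega)
      have hsp := le_spOf u (k : Int) ((cnt : Int) - 1) (by omega) (by omega) (by omega)
        (by have ht : ((cnt : Int) - 1).toNat = cnt - 1 := by omega
            rw [PySem.List.pyGetD_eq_getElem u 0 (by omega) (by omega),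
                PySem.List.pyGetD_eq_getElem u 0 (by omega) (by omega)]
            simp only [ht, Int.toNat_natCast]
            omega)
      have : (cnt : Int) - k ≤ pvSpOf u := by omega
      exact le_trans this (le_max_left _ _)
    · have : (cnt : Int) - k ≤ 1 := by omega
      exact le_trans this (le_max_right _ _)
  have h0A := spOf_nonneg u
  omega

-- pvWinOf is invariant under permutation of the base list
lemma winOf_perm (s u : List Int) (hp : s.Perm u) (hne : s ≠ []) :
    pvWinOf s = pvWinOf u := by
  have hune : u ≠ [] := by
    intro h; rw [h] at hp; exact hne (List.Perm.eq_nil hp)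
  have hcnt : ∀ lo, s.countP (fun x => decide (lo ≤ x ∧ x ≤ lo + 4))
      = u.countP (fun x => decide (lo ≤ x ∧ x ≤ lo + 4)) := fun lo => hp.countP_eq _
  unfold pvWinOf
  apply maxD_eq
  · simpa using hne
  · simpa using hune
  · intro a ha
    obtain ⟨lo, hlo, hval⟩ := List.mem_map.1 ha
    refine ⟨a, List.mem_map.2 ⟨lo, hp.mem_iff.1 hlo, by rw [← hval, hcnt]⟩, le_refl _⟩
  · intro b hb
    obtain ⟨lo, hlo, hval⟩ := List.mem_map.1 hb
    refine ⟨b, List.mem_map.2 ⟨lo, hp.mem_iff.2 hlo, by rw [← hval, hcnt]⟩, le_refl _⟩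

-- ===== VERDICT (by name: the statement is the Claim_ definition above) =====
theorem get_board_bucket_spec : Claim_equal_get_board_bucket := by
  intro bc _hdom hpre
  unfold Spec_get_board_bucket
  by_cases hne : bc = []
  · subst hne; rfl
  · simp only [get_board_bucket, get_board_bucket_alt, if_neg hne]
    set ranks := bc.map (fun c => PySem.Int.floordiv c 4) with hranks
    set suits := bc.map (fun c => PySem.Int.mod c 4) with hsuits
    have hrne : ranks ≠ [] := by simpa [hranks] using hne
    have hsne : suits ≠ [] := by simpa [hsuits] using hne
    have hrb : ∀ r ∈ ranks, 0 ≤ r ∧ r < (13 : Int) := by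
      intro r hr
      obtain ⟨c, hc, rfl⟩ := List.mem_map.1 hr
      obtain ⟨h0, h1⟩ := hpre c hc
      rw [PySem.Int.floordiv_eq_ediv_of_pos (by omega)]
      omega
    have hsb : ∀ s ∈ suits, 0 ≤ s ∧ s < (4 : Int) := by
      intro s hs
      obtain ⟨c, hc, rfl⟩ := List.mem_map.1 hs
      rw [PySem.Int.mod_eq_emod_of_pos (by omega)]
      exact ⟨Int.emod_nonneg c (by omega), Int.emod_lt_of_pos c (by omega)⟩
    -- rank and suit histogram maxima
    rw [max_hist_eq ranks 13 hrne hrb (by omega), max_hist_eq suits 4 hsne hsb (by omega)]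
    -- straight potential
    have hsetne : PySem.Set.ofList ranks ≠ [] := by
      obtain ⟨x, hx⟩ := List.exists_mem_of_ne_nil ranks hrne
      intro h
      have := (PySem.Set.mem_ofList ranks x).2 hx
      rw [h] at this; simp at this
    set u := PySem.List.sorted (PySem.Set.ofList ranks) (fun x => x) with hu
    have hperm : (PySem.Set.ofList ranks).Perm u := (PySem.List.sorted_perm _ _ _).symm
    have hune : u ≠ [] := by
      intro h
      exact hsetne (List.Perm.eq_nil (h ▸ hperm))
    have hsp : (PySem.List.pyRange 0 ((u.length : Nat) : Int)).foldl (fun sp i =>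
        (PySem.List.pyRange (i + 1) ((u.length : Nat) : Int)).foldl (fun sp j =>
          if PySem.List.pyGetD u j 0 - PySem.List.pyGetD u i 0 ≤ 4
          then max sp (j - i + 1) else sp) sp) 0 = pvSpOf u := rfl
    rw [hsp]
    rw [show (PySem.List.max? ((PySem.Set.ofList ranks).map (fun lo =>
        ((PySem.Set.ofList ranks).countP (fun x => decide (lo ≤ x ∧ x ≤ lo + 4)) : Int)))
        (fun x => x)).getD 0 = pvWinOf (PySem.Set.ofList ranks) from rfl]
    rw [winOf_perm _ u hperm hsetne]
    rw [sp_win u (PySem.List.sorted_ofList_pairwise_lt _) hune]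
    -- broadway
    rw [PySem.List.foldl_ite_add_one (fun r => r ≥ 8) ranks 0]
    simp
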